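-- pv_equiv track=rewrite | github.com/TomasTeixeira2003/Foundations-of-Programming | 1ºProjeto/Proj1.py | corrigir_palavra
-- ===== SOURCE A (Python) =====
-- def corrigir_palavra(cad_caracteres):
--     """
--     cad_caracteres -> cad_caracteres
--     Recebe uma cadeia de carateres que representa uma palavra (potencialmente \
--     modificada por um surto de letras) e devolve a cadeia de carateres corrigida
--     Autor: Tomás Sobral Teixeira
--     """
--     lista_caracteres = list(cad_caracteres)
--     for i in range(len(lista_caracteres)//2):
--         contador = 0
--         comp_lista = len(lista_caracteres)
--         while contador < comp_lista - 1:
--             if ord(lista_caracteres[contador]) == ord(lista_caracteres[contador + 1]) + ord('A') - ord('a') or \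
--                     ord(lista_caracteres[contador]) + ord('A') - ord('a') == ord(lista_caracteres[contador + 1]):# Transforma as letras em maiúsculas
--                 del(lista_caracteres[contador:contador + 2])
--                 contador += 1
--                 comp_lista -= 2
--             else:
--                 contador += 1
--     nova_cad_caracteres = ''
--     for i in lista_caracteres:
--         nova_cad_caracteres = nova_cad_caracteres + i
--     return nova_cad_caracteres
-- ===== SOURCE B (Python) =====
-- def corrigir_palavra(cad_caracteres):
--     """Repeat single left-to-right sweeps (removing a matching pair and keeping the
--     following character unconditionally, as the original scan does) until a sweep
--     deletes nothing, instead of always running len//2 in-place-deletion passes."""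
--     cs = list(cad_caracteres)
--     while True:
--         out = []
--         i = 0
--         n = len(cs)
--         while i < n:
--             if i + 1 < n and abs(ord(cs[i]) - ord(cs[i + 1])) == 32:
--                 if i + 2 < n:
--                     out.append(cs[i + 2])
--                 i += 3
--             else:
--                 out.append(cs[i])
--                 i += 1
--         if len(out) == len(cs):
--             return ''.join(out)
--         cs = out
-- ===== Notes on version B (the rewrite author's own statement) =====
-- stated objective: faster
-- what changed: B replaces A's fixed len//2 passes of in-place slice-deletions over a Python list with repeated single rebuild sweeps that stop as soon as a sweep deletes nothing, so match-free input takes one O(n) sweep instead of O(n^2) work.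
import Mathlib
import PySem

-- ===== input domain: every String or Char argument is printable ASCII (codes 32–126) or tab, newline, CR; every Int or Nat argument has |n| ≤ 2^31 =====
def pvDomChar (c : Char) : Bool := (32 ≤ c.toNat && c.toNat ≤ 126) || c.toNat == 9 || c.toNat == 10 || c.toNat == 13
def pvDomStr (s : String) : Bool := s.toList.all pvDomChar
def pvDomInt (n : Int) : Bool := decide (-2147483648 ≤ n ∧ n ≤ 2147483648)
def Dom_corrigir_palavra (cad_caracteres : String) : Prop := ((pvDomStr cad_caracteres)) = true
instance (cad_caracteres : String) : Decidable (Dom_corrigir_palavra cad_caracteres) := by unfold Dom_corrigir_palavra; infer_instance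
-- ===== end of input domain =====

-- B stops the pass loop at the first sweep that deletes nothing, instead of always
-- running ⌊n/2⌋ in-place-deletion passes; equivalence proved for all inputs (no Pre_).

-- ===== PORT A =====
-- inner while loop of A: state (lista, contador, comp_lista); indices read with getD
-- are always in range because contador < comp_lista - 1 = lista.length - 1.
def pvWhileA (lista : List Char) (contador comp : Nat) : List Char :=
  if contador + 1 < comp then  -- while contador < comp_lista - 1 (Python ints; exact since contador ≥ 0)
    let a := lista.getD contador ' '
    let b := lista.getD (contador + 1) ' '
    if ((a.toNat : Int) = (b.toNat : Int) + 65 - 97) ∨ ((a.toNat : Int) + 65 - 97 = (b.toNat : Int)) then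
      -- del lista[contador:contador+2] (exact: contador ≥ 0)
      pvWhileA (lista.take contador ++ lista.drop (contador + 2)) (contador + 1) (comp - 2)
    else
      pvWhileA lista (contador + 1) comp
  else lista
termination_by comp - contador
decreasing_by all_goals omega

def corrigir_palavra (cad_caracteres : String) : String :=
  let lista := cad_caracteres.toList
  let lista := (List.range (lista.length / 2)).foldl (fun l _ => pvWhileA l 0 l.length) lista
  -- nova_cad_caracteres accumulation loop; string concatenation modeled on List Char (exact)
  String.mk (lista.foldl (fun acc c => acc ++ [c]) [])

-- ===== PORT B =====
-- one sweep of Source B's inner while loop (kept char after a deleted pair, jump i+3)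
def pvPassB : List Char → List Char
  | [] => []
  | [a] => [a]
  | a :: b :: rest =>
    if ((a.toNat : Int) - (b.toNat : Int)).natAbs = 32 then
      match rest with
      | [] => []
      | c :: rs => c :: pvPassB rs
    else a :: pvPassB (b :: rest)
termination_by l => l.length

-- needed by pvIterB's termination
theorem pvPassB_length_le (l : List Char) : (pvPassB l).length ≤ l.length := by
  fun_induction pvPassB l with
  | case1 => simp [pvPassB]
  | case2 => simp [pvPassB]
  | case3 a b h => simp [pvPassB, h]
  | case4 a b h c rs ih => simp [pvPassB, h]; omega
  | case5 a b rest h ih => simp [pvPassB, h]; simpa using ih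

def pvIterB (cs : List Char) : List Char :=
  if (pvPassB cs).length = cs.length then pvPassB cs else pvIterB (pvPassB cs)
termination_by cs.length
decreasing_by have := pvPassB_length_le cs; omega

def corrigir_palavra_alt (cad_caracteres : String) : String :=
  String.mk (pvIterB cad_caracteres.toList)

-- ===== PRECONDITION & SPEC =====
def Spec_corrigir_palavra (cad_caracteres : String) (out : String) : Prop := out = corrigir_palavra_alt cad_caracteres
instance (cad_caracteres : String) (out : String) : Decidable (Spec_corrigir_palavra cad_caracteres out) := by unfold Spec_corrigir_palavra; infer_instance

-- ===== CLAIM (what is proved, stated in full; the proofs are below) =====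
def Claim_equal_corrigir_palavra : Prop := ∀ (cad_caracteres : String), Dom_corrigir_palavra cad_caracteres → Spec_corrigir_palavra cad_caracteres (corrigir_palavra cad_caracteres)

-- ===== LEMMAS AND PROOFS =====

-- the join loop is the identity on the character list
theorem pvJoin_eq (l : List Char) : l.foldl (fun acc c => acc ++ [c]) [] = l := by
  have h : ∀ (l acc : List Char), l.foldl (fun acc c => acc ++ [c]) acc = acc ++ l := by
    intro l; induction l with
    | nil => simp
    | cons x xs ih => intro acc; simp [List.foldl, ih]
  simpa using h l []

-- the two pair conditions are the same test
theorem pvCond_eq (a b : Char) :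
    (((a.toNat : Int) = (b.toNat : Int) + 65 - 97) ∨ ((a.toNat : Int) + 65 - 97 = (b.toNat : Int)))
    ↔ ((a.toNat : Int) - (b.toNat : Int)).natAbs = 32 := by
  omega

-- A's inner while loop, run on kept ++ rest with the pointer at |kept|, is one B sweep of rest
theorem pvWhileA_eq_pass (rest : List Char) : ∀ kept : List Char,
    pvWhileA (kept ++ rest) kept.length (kept.length + rest.length) = kept ++ pvPassB rest := by
  fun_induction pvPassB rest with
  | case1 => intro kept; rw [pvWhileA]; simp [pvPassB]
  | case2 a => intro kept; rw [pvWhileA]; simp [pvPassB]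
  | case3 a b h =>
    intro kept
    rw [pvWhileA]
    have hc : kept.length + 1 < kept.length + [a, b].length := by simp
    rw [if_pos hc]
    have hga : (kept ++ [a, b]).getD kept.length ' ' = a := by
      rw [List.getD_append_right kept _ ' ' _ (le_refl _)]; simp
    have hgb : (kept ++ [a, b]).getD (kept.length + 1) ' ' = b := by
      rw [List.getD_append_right kept _ ' ' _ (by omega)]; simp
    rw [hga, hgb, if_pos ((pvCond_eq a b).mpr h)]
    have ht : (kept ++ [a, b]).take kept.length = kept := by
      simp
    have hd : (kept ++ [a, b]).drop (kept.length + 2) = [] := by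
      simp [List.drop_append]
    rw [ht, hd]
    rw [pvWhileA, if_neg (by simp only [List.length_cons, List.length_nil]; omega)]
  | case4 a b h c rs ih =>
    intro kept
    rw [pvWhileA]
    have hc : kept.length + 1 < kept.length + (a :: b :: c :: rs).length := by simp
    rw [if_pos hc]
    have hga : (kept ++ a :: b :: c :: rs).getD kept.length ' ' = a := by
      rw [List.getD_append_right kept _ ' ' _ (le_refl _)]; simp
    have hgb : (kept ++ a :: b :: c :: rs).getD (kept.length + 1) ' ' = b := by
      rw [List.getD_append_right kept _ ' ' _ (by omega)]; simp
    rw [hga, hgb, if_pos ((pvCond_eq a b).mpr h)]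
    have ht : (kept ++ a :: b :: c :: rs).take kept.length = kept := by
      simp
    have hd : (kept ++ a :: b :: c :: rs).drop (kept.length + 2) = c :: rs := by
      simp [List.drop_append]
    rw [ht, hd]
    have hre : kept ++ c :: rs = (kept ++ [c]) ++ rs := by simp
    have hlen : kept.length + 1 = (kept ++ [c]).length := by simp
    have hlen2 : kept.length + (a :: b :: c :: rs).length - 2 = (kept ++ [c]).length + rs.length := by
      simp; omega
    rw [hre, hlen, hlen2, ih (kept ++ [c])]
    simp [pvPassB, h]
  | case5 a b rest h ih =>
    intro kept
    rw [pvWhileA]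
    have hc : kept.length + 1 < kept.length + (a :: b :: rest).length := by simp
    rw [if_pos hc]
    have hga : (kept ++ a :: b :: rest).getD kept.length ' ' = a := by
      rw [List.getD_append_right kept _ ' ' _ (le_refl _)]; simp
    have hgb : (kept ++ a :: b :: rest).getD (kept.length + 1) ' ' = b := by
      rw [List.getD_append_right kept _ ' ' _ (by omega)]; simp
    rw [hga, hgb, if_neg (by rw [pvCond_eq]; exact h)]
    have hre : kept ++ a :: b :: rest = (kept ++ [a]) ++ (b :: rest) := by simp
    have hlen : kept.length + 1 = (kept ++ [a]).length := by simp
    have hlen2 : kept.length + (a :: b :: rest).length = (kept ++ [a]).length + (b :: rest).length := by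
      simp; omega
    rw [hre, hlen, hlen2, ih (kept ++ [a])]
    simp [pvPassB, h]

theorem pvWhileA_eq_pass0 (l : List Char) : pvWhileA l 0 l.length = pvPassB l := by
  simpa using pvWhileA_eq_pass l []

-- a sweep either deletes nothing (and is the identity) or removes at least two characters
theorem pvPassB_eq_or_lt (l : List Char) :
    pvPassB l = l ∨ (pvPassB l).length + 2 ≤ l.length := by
  fun_induction pvPassB l with
  | case1 => left; simp [pvPassB]
  | case2 a => left; simp [pvPassB]
  | case3 a b h => right; simp [pvPassB, h]
  | case4 a b h c rs ih =>
    right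
    have := pvPassB_length_le rs
    simp [pvPassB, h]; omega
  | case5 a b rest h ih =>
    rcases ih with h1 | h1
    · left
      rw [h1]
    · right
      simp only [List.length_cons] at h1 ⊢
      omega

theorem pvPassB_short (l : List Char) (h : l.length ≤ 1) : pvPassB l = l := by
  match l with
  | [] => simp [pvPassB]
  | [a] => simp [pvPassB]
  | a :: b :: rest => simp at h

theorem pvIterB_fix (l : List Char) (h : pvPassB l = l) : pvIterB l = l := by
  rw [pvIterB.eq_def]
  simp [h]

-- ⌊n/2⌋ iterated sweeps reach the fixpoint that pvIterB computes
theorem pvIter_eq (m : Nat) : ∀ l : List Char, l.length ≤ 2 * m + 1 →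
    pvPassB^[m] l = pvIterB l := by
  induction m with
  | zero =>
    intro l hl
    have h := pvPassB_short l (by omega)
    simp [pvIterB_fix l h, Function.iterate_zero]
  | succ m ih =>
    intro l hl
    rcases pvPassB_eq_or_lt l with h | h
    · rw [pvIterB_fix l h]
      have : ∀ k, pvPassB^[k] l = l := by
        intro k; induction k with
        | zero => rfl
        | succ k ihk => rw [Function.iterate_succ_apply, h, ihk]
      exact this (m + 1)
    · rw [Function.iterate_succ_apply]
      have hne : ¬ (pvPassB l).length = l.length := by omega
      rw [ih (pvPassB l) (by omega)]
      conv_rhs => rw [pvIterB.eq_def]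
      simp [hne]

theorem pvFold_range (m : Nat) (l : List Char) :
    (List.range m).foldl (fun l _ => pvWhileA l 0 l.length) l = pvPassB^[m] l := by
  induction m generalizing l with
  | zero => rfl
  | succ m ih =>
    rw [List.range_succ, List.foldl_append, ih, Function.iterate_succ_apply']
    simp [pvWhileA_eq_pass0]

-- ===== VERDICT (by name: the statement is the Claim_ definition above) =====
theorem corrigir_palavra_spec : Claim_equal_corrigir_palavra := by
  intro s _
  unfold Spec_corrigir_palavra corrigir_palavra corrigir_palavra_alt
  simp only [pvJoin_eq, pvFold_range]
  rw [pvIter_eq (s.toList.length / 2) s.toList (by omega)]
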